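-- pv_equiv track=rewrite | github.com/LazyKid923/ParkLah | calc_parking_cost.py | find_carpark
-- ===== SOURCE A (Python) =====
-- def find_carpark(rows: list[dict[str, str]], query: str) -> dict[str, str]:
--     q = query.strip().lower()
--
--     exact = [r for r in rows if (r.get("carpark", "").strip().lower() == q)]
--     if len(exact) == 1:
--         return exact[0]
--     if len(exact) > 1:
--         return exact[0]
--
--     partial = [r for r in rows if q in r.get("carpark", "").strip().lower()]
--     if not partial:
--         raise ValueError(f'No carpark matched query: "{query}"')
--     if len(partial) > 1:
--         names = ", ".join(r.get("carpark", "") for r in partial[:8])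
--         raise ValueError(
--             f'Ambiguous carpark query: "{query}" matched {len(partial)} rows. '
--             f"Try a more specific name. Examples: {names}"
--         )
--     return partial[0]
-- ===== SOURCE B (Python) =====
-- def find_carpark(rows: list[dict[str, str]], query: str) -> dict[str, str]:
--     q = query.strip().lower()
--     partial = []
--     for r in rows:
--         name = r.get("carpark", "").strip().lower()
--         if name == q:
--             return r  # first exact match wins, as in the original
--         if q in name:
--             partial.append(r)
--     if not partial:
--         raise ValueError(f'No carpark matched query: "{query}"')
--     if len(partial) > 1:
--         names = ", ".join(r.get("carpark", "") for r in partial[:8])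
--         raise ValueError(
--             f'Ambiguous carpark query: "{query}" matched {len(partial)} rows. '
--             f"Try a more specific name. Examples: {names}"
--         )
--     return partial[0]
-- ===== Notes on version B (the rewrite author's own statement) =====
-- stated objective: simpler
-- what changed: One single pass with an early return on the first exact match and a partial-match accumulator replaces A's two separate full list-comprehension scans.
import Mathlib
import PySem

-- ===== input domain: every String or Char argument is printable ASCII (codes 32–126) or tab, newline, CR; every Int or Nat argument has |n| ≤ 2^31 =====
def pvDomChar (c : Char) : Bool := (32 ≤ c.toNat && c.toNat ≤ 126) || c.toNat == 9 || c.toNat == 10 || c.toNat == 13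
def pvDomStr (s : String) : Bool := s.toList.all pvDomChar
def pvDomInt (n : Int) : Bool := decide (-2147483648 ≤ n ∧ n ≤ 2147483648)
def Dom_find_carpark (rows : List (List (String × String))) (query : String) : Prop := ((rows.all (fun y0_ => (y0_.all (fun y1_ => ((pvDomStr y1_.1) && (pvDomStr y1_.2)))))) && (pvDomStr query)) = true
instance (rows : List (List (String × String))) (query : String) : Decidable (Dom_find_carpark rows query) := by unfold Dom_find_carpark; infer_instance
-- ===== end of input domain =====

-- B is a single pass with an early return on the first exact match, instead of A's two full scans;
-- the equivalence is about the RETURN value (A's raising inputs are excluded by Pre_).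

-- r.get("carpark", "").strip().lower()  (shared helper of both ports and of Pre_)
def pvNorm (r : List (String × String)) : String :=
  PySem.Str.lower (PySem.Str.strip (PySem.Dict.getD ⟨r⟩ "carpark" ""))

-- ===== PORT A =====
def find_carpark (rows : List (List (String × String))) (query : String) : List (String × String) :=
  let q := PySem.Str.lower (PySem.Str.strip query)
  let exact := rows.filter (fun r => pvNorm r == q)
  if exact.length == 1 then exact.headD []
  else if exact.length > 1 then exact.headD []
  else
    let part := rows.filter (fun r => PySem.Str.isIn q (pvNorm r))
    if part.isEmpty then []            -- raise ValueError (outside Pre_)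
    else if part.length > 1 then []    -- raise ValueError (outside Pre_)
    else part.headD []

-- ===== PORT B =====
-- the for-loop of Source B: early return on exact match, accumulator for partial matches
def pvAltGo (q : String) (rows acc : List (List (String × String))) : List (String × String) :=
  match rows with
  | [] =>
    if acc.isEmpty then []             -- raise ValueError (outside Pre_)
    else if acc.length > 1 then []     -- raise ValueError (outside Pre_)
    else acc.headD []
  | r :: rest =>
    let name := pvNorm r
    if name == q then r
    else if PySem.Str.isIn q name then pvAltGo q rest (acc ++ [r])
    else pvAltGo q rest acc

def find_carpark_alt (rows : List (List (String × String))) (query : String) : List (String × String) :=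
  let q := PySem.Str.lower (PySem.Str.strip query)
  pvAltGo q rows []

-- ===== PRECONDITION & SPEC =====
-- Pre_ excludes exactly the inputs where Python A raises ValueError: no exact match together with
-- zero or more than one partial match (B raises the identical ValueError there).
def Pre_find_carpark (rows : List (List (String × String))) (query : String) : Prop :=
  let q := PySem.Str.lower (PySem.Str.strip query)
  (∃ r ∈ rows, pvNorm r = q) ∨ (rows.filter (fun r => PySem.Str.isIn q (pvNorm r))).length = 1
instance (rows : List (List (String × String))) (query : String) : Decidable (Pre_find_carpark rows query) := by unfold Pre_find_carpark; infer_instance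

def pvWitness_find_carpark : (List (List (String × String))) × String :=
  ([[("carpark", "Plaza A")], [("carpark", "Plaza B")]], " plaza a ")

def Spec_find_carpark (rows : List (List (String × String))) (query : String) (out : List (String × String)) : Prop := out = find_carpark_alt rows query
instance (rows : List (List (String × String))) (query : String) (out : List (String × String)) : Decidable (Spec_find_carpark rows query out) := by unfold Spec_find_carpark; infer_instance

-- ===== CLAIM (what is proved, stated in full; the proofs are below) =====
def Claim_equal_find_carpark : Prop := ∀ (rows : List (List (String × String))) (query : String), Dom_find_carpark rows query → Pre_find_carpark rows query → Spec_find_carpark rows query (find_carpark rows query)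

-- ===== LEMMAS AND PROOFS =====

-- A's post-loop logic on a completed partial list
def pvFinish (p : List (List (String × String))) : List (String × String) :=
  if p.isEmpty then [] else if p.length > 1 then [] else p.headD []

-- the loop of B computes: first exact match if any, else A's post-logic on acc ++ partial matches
theorem pvAltGo_spec (q : String) :
    ∀ (l acc : List (List (String × String))),
      pvAltGo q l acc =
        if (l.filter (fun r => pvNorm r == q)).isEmpty then
          pvFinish (acc ++ l.filter (fun r => PySem.Str.isIn q (pvNorm r)))
        else (l.filter (fun r => pvNorm r == q)).headD [] := by
  intro l
  induction l with
  | nil => intro acc; simp [pvAltGo, pvFinish]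
  | cons r rest ih =>
    intro acc
    by_cases h : pvNorm r = q
    · simp [pvAltGo, h]
    · by_cases h2 : PySem.Str.isIn q (pvNorm r) = true
      · have h2' : PySem.Chars.isIn q.toList (pvNorm r).toList = true := by simpa using h2
        simp [pvAltGo, h, h2', ih (acc ++ [r])]
      · have h2' : ¬ PySem.Chars.isIn q.toList (pvNorm r).toList = true := by simpa using h2
        simp [pvAltGo, h, h2', ih acc]

theorem ports_agree (rows : List (List (String × String))) (query : String) :
    find_carpark rows query = find_carpark_alt rows query := by
  unfold find_carpark find_carpark_alt
  rw [pvAltGo_spec]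
  rcases he : rows.filter (fun r => pvNorm r == PySem.Str.lower (PySem.Str.strip query)) with _ | ⟨e, t⟩
  · simp [he, pvFinish]
  · have hlen : (e :: t).length ≥ 1 := by simp
    simp only [he, List.isEmpty_cons, Bool.false_eq_true, if_false]
    split_ifs with h1 h2 <;> simp_all

-- ===== VERDICT (by name: the statement is the Claim_ definition above) =====
theorem find_carpark_spec : Claim_equal_find_carpark := by
  intro rows query _ _
  unfold Spec_find_carpark
  exact ports_agree rows query
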